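-- pv_equiv track=rewrite | github.com/JayLi2018/RuleCleanerKDD25 | rbbm_src/labelling_func_src/src/LabelRepair.py | gen_unique_sequence_with_repet
-- ===== SOURCE A (Python) =====
-- def gen_unique_sequence_with_repet(l, card):
--
-- 	def extendl(l, cands):
-- 		res = []
-- 		for c in cands:
-- 			nl=l[:]
-- 			nl.append(c)
-- 			res.append(nl)
-- 		return res
--
-- 	res = [[e] for e in l]
-- 	i=1
-- 	while(i<card):
-- 		new_res = []
-- 		for r in res:
-- 			new_res.extend(extendl(r,l))
-- 		res = new_res
-- 		i+=1
--
-- 	return res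
-- ===== SOURCE B (Python) =====
-- def gen_unique_sequence_with_repet(l, card):
--     if card <= 1:
--         return [[e] for e in l]
--     prefixes = gen_unique_sequence_with_repet(l, card - 1)
--     return [p + [c] for p in prefixes for c in l]
-- ===== Notes on version B (the rewrite author's own statement) =====
-- stated objective: simpler
-- what changed: Replaced the while-loop over positions with helper-based list extension by a direct recursion on card whose step is a single nested comprehension.
import Mathlib
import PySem

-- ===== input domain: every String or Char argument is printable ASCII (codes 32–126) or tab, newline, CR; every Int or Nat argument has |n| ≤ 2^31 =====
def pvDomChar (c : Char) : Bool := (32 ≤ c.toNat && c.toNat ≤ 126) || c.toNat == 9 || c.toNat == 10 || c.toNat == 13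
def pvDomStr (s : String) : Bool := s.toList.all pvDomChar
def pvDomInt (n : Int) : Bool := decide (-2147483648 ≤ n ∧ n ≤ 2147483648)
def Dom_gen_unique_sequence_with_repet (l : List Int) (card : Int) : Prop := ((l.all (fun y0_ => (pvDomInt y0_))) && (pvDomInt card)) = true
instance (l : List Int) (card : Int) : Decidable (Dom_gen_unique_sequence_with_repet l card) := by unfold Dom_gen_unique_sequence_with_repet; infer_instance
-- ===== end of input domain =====

-- B recurses on card instead of A's position-by-position while loop; same value everywhere.

-- ===== PORT A =====
-- helper extendl(l, cands): appends each candidate to a copy of l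
def pvExtendl (l : List Int) (cands : List Int) : List (List Int) :=
  cands.foldl (fun res c => res ++ [l ++ [c]]) []

-- one iteration of the while-loop body: new_res built by extending each r
def pvStepA (l : List Int) (res : List (List Int)) : List (List Int) :=
  res.foldl (fun new_res r => new_res ++ pvExtendl r l) []

-- while(i < card): runs (card-1).toNat times
def pvWhileA (l : List Int) : Nat → List (List Int) → List (List Int)
  | 0, res => res
  | n + 1, res => pvWhileA l n (pvStepA l res)

def gen_unique_sequence_with_repet (l : List Int) (card : Int) : List (List Int) :=
  pvWhileA l (card - 1).toNat (l.map (fun e => [e]))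

-- ===== PORT B =====
def gen_unique_sequence_with_repet_alt (l : List Int) (card : Int) : List (List Int) :=
  if card ≤ 1 then l.map (fun e => [e])
  else (gen_unique_sequence_with_repet_alt l (card - 1)).flatMap
         (fun p => l.map (fun c => p ++ [c]))
termination_by card.toNat
decreasing_by omega

-- ===== PRECONDITION & SPEC =====
def Spec_gen_unique_sequence_with_repet (l : List Int) (card : Int) (out : List (List Int)) : Prop := out = gen_unique_sequence_with_repet_alt l card
instance (l : List Int) (card : Int) (out : List (List Int)) : Decidable (Spec_gen_unique_sequence_with_repet l card out) := by unfold Spec_gen_unique_sequence_with_repet; infer_instance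

-- ===== CLAIM (what is proved, stated in full; the proofs are below) =====
def Claim_equal_gen_unique_sequence_with_repet : Prop := ∀ (l : List Int) (card : Int), Dom_gen_unique_sequence_with_repet l card → Spec_gen_unique_sequence_with_repet l card (gen_unique_sequence_with_repet l card)

-- ===== LEMMAS AND PROOFS =====

theorem pvExtendl_eq (l cands : List Int) :
    pvExtendl l cands = cands.map (fun c => l ++ [c]) := by
  unfold pvExtendl
  suffices h : ∀ acc : List (List Int),
      cands.foldl (fun res c => res ++ [l ++ [c]]) acc = acc ++ cands.map (fun c => l ++ [c]) by
    simpa using h []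
  induction cands with
  | nil => simp [List.foldl]
  | cons c cs ih => intro acc; simp [List.foldl, ih]

theorem pvStepA_eq (l : List Int) (res : List (List Int)) :
    pvStepA l res = res.flatMap (fun r => l.map (fun c => r ++ [c])) := by
  unfold pvStepA
  suffices h : ∀ acc : List (List Int),
      res.foldl (fun nr r => nr ++ pvExtendl r l) acc
        = acc ++ res.flatMap (fun r => l.map (fun c => r ++ [c])) by
    simpa using h []
  induction res with
  | nil => simp [List.foldl]
  | cons r rs ih => intro acc; simp [List.foldl, pvExtendl_eq, List.flatMap]

theorem pvWhileA_step (l : List Int) (n : Nat) (res : List (List Int)) :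
    pvWhileA l n (pvStepA l res) = pvStepA l (pvWhileA l n res) := by
  induction n generalizing res with
  | zero => rfl
  | succ n ih => simp [pvWhileA, ih]

theorem alt_eq_whileA (l : List Int) (n : Nat) (card : Int) (h : (card - 1).toNat = n) :
    gen_unique_sequence_with_repet_alt l card = pvWhileA l n (l.map (fun e => [e])) := by
  induction n generalizing card with
  | zero =>
      have hc : card ≤ 1 := by omega
      rw [gen_unique_sequence_with_repet_alt]
      simp [hc, pvWhileA]
  | succ n ih =>
      have hc : ¬ card ≤ 1 := by omega
      rw [gen_unique_sequence_with_repet_alt]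
      simp only [hc, if_false]
      rw [ih (card - 1) (by omega)]
      rw [show (n + 1) = n + 1 from rfl, pvWhileA, pvWhileA_step, pvStepA_eq]

-- ===== VERDICT (by name: the statement is the Claim_ definition above) =====
theorem gen_unique_sequence_with_repet_spec : Claim_equal_gen_unique_sequence_with_repet := by
  intro l card _
  unfold Spec_gen_unique_sequence_with_repet gen_unique_sequence_with_repet
  exact (alt_eq_whileA l (card - 1).toNat card rfl).symm
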